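-- pv_equiv track=rewrite | github.com/izlim/CodeinPlaceFinalProject | project.py | generate_fwd_primer
-- ===== SOURCE A (Python) =====
-- def generate_fwd_primer(sequence):
--     fwd_primer = ""
--     fwd_tm = 0
--     for i in range(len(sequence)):
--         fwd_primer = fwd_primer + sequence[i]
--         if sequence[i] == "G" or sequence[i] == "C":
--             fwd_tm += 4
--         else:
--             fwd_tm += 2
--         if fwd_tm > 53:
--             break
--     return fwd_primer, fwd_tm
-- ===== SOURCE B (Python) =====
-- def generate_fwd_primer(sequence):
--     # precompute cumulative melting temps, then locate the first cutpoint > 53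
--     cums = []
--     total = 0
--     for c in sequence:
--         total += 4 if c in "GC" else 2
--         cums.append(total)
--     idx = next((i for i, t in enumerate(cums) if t > 53), None)
--     if idx is None:
--         return sequence, total
--     return sequence[:idx + 1], cums[idx]
-- ===== Notes on version B (the rewrite author's own statement) =====
-- stated objective: alternative
-- what changed: Replaces A's interleaved build-string-and-break loop by a precompute pass (cumulative melting temps) followed by locating the first index exceeding 53 and slicing the sequence there.
import Mathlib
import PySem

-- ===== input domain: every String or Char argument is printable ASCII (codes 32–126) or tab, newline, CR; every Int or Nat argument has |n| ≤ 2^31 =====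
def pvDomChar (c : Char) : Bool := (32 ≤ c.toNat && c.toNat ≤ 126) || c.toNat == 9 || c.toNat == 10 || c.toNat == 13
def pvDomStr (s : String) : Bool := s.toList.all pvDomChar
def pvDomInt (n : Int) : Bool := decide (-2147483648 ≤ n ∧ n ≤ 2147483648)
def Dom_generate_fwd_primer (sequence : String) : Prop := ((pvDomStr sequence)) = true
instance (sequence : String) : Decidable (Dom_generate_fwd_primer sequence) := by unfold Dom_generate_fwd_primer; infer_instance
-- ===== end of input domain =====

-- B replaces A's interleaved build-and-break loop by a precompute-cumulative-temps
-- pass followed by locating the first cutpoint exceeding 53 (alternative decomposition, same cost).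


-- ===== PORT A =====
-- A's for-loop with break: recursion over the remaining characters,
-- carrying the primer built so far and the running melting temp.
def pvGoA : List Char → List Char → Int → List Char × Int
  | [], primer, tm => (primer, tm)
  | c :: rest, primer, tm =>
    let primer' := primer ++ [c]
    let tm' := tm + (if c = 'G' ∨ c = 'C' then 4 else 2)
    if tm' > 53 then (primer', tm') else pvGoA rest primer' tm'

def generate_fwd_primer (sequence : String) : String × Int :=
  let r := pvGoA sequence.toList [] 0
  (String.mk r.1, r.2)

-- ===== PORT B =====
-- first pass of Source B: the list of cumulative melting temps (and the running total)
def pvCums (tm : Int) : List Char → List Int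
  | [] => []
  | c :: rest =>
    let t := tm + (if c = 'G' ∨ c = 'C' then 4 else 2)
    t :: pvCums t rest

-- Source B's `next((i for i, t in enumerate(cums) if t > 53), None)`
def pvLocate : List Int → Nat → Option (Nat × Int)
  | [], _ => none
  | t :: rest, i => if t > 53 then some (i, t) else pvLocate rest (i + 1)

def generate_fwd_primer_alt (sequence : String) : String × Int :=
  let chars := sequence.toList
  let cums := pvCums 0 chars
  let total := chars.foldl (fun a c => a + (if c = 'G' ∨ c = 'C' then 4 else 2)) (0 : Int)
  match pvLocate cums 0 with
  | none => (sequence, total)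
  | some (i, t) => (String.mk (chars.take (i + 1)), t)

-- ===== PRECONDITION & SPEC =====
def Spec_generate_fwd_primer (sequence : String) (out : String × Int) : Prop := out = generate_fwd_primer_alt sequence
instance (sequence : String) (out : String × Int) : Decidable (Spec_generate_fwd_primer sequence out) := by unfold Spec_generate_fwd_primer; infer_instance

-- ===== CLAIM (what is proved, stated in full; the proofs are below) =====
def Claim_equal_generate_fwd_primer : Prop := ∀ (sequence : String), Dom_generate_fwd_primer sequence → Spec_generate_fwd_primer sequence (generate_fwd_primer sequence)

-- ===== LEMMAS AND PROOFS =====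

theorem pvLocate_shift (cs : List Int) (i : Nat) :
    pvLocate cs (i + 1) = Option.map (fun p => (p.1 + 1, p.2)) (pvLocate cs i) := by
  induction cs generalizing i with
  | nil => simp [pvLocate]
  | cons t rest ih =>
    simp only [pvLocate]
    split
    · rfl
    · exact ih (i + 1)

theorem pvGoA_eq (chars primer : List Char) (tm : Int) :
    pvGoA chars primer tm =
      match pvLocate (pvCums tm chars) 0 with
      | none => (primer ++ chars,
          chars.foldl (fun a c => a + (if c = 'G' ∨ c = 'C' then 4 else 2)) tm)
      | some (i, t) => (primer ++ chars.take (i + 1), t) := by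
  induction chars generalizing primer tm with
  | nil => simp [pvGoA, pvCums, pvLocate]
  | cons c rest ih =>
    simp only [pvGoA, pvCums, pvLocate]
    set w : Int := if c = 'G' ∨ c = 'C' then 4 else 2 with hw
    by_cases hgt : (53 : Int) < tm + w
    · simp [hgt, List.take]
    · simp only [if_neg hgt]
      rw [ih, pvLocate_shift]
      cases h : pvLocate (pvCums (tm + w) rest) 0 with
      | none => simp only [List.foldl]; rw [← hw]; simp
      | some p => cases p with | mk i t => simp [List.take]

-- ===== VERDICT (by name: the statement is the Claim_ definition above) =====
theorem generate_fwd_primer_spec : Claim_equal_generate_fwd_primer := by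
  intro sequence _
  unfold Spec_generate_fwd_primer generate_fwd_primer generate_fwd_primer_alt
  simp only [pvGoA_eq]
  cases h : pvLocate (pvCums 0 sequence.toList) 0 with
  | none => rw [Prod.mk.injEq]; exact ⟨String.ofList_toList, rfl⟩
  | some p => cases p; simp
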